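-- pv_equiv track=rewrite | github.com/RabiaHameedKhan/Linear-Algebra-in-python | Applications/equations.py | form_matrix
-- ===== SOURCE A (Python) =====
-- def form_matrix(lhs, rhs, elements):
--     matrix = []
--     for element in elements:
--         row = []
--         for compound in lhs:
--             row.append(compound.get(element, 0))
--         for compound in rhs:
--             row.append(-compound.get(element, 0))
--         matrix.append(row)
--     return matrix
-- ===== SOURCE B (Python) =====
-- def form_matrix(lhs, rhs, elements):
--     cols = [[c.get(e, 0) for e in elements] for c in lhs]
--     cols += [[-c.get(e, 0) for e in elements] for c in rhs]
--     if not cols: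
--         return [[] for _ in elements]
--     return [list(row) for row in zip(*cols)]
-- ===== Notes on version B (the rewrite author's own statement) =====
-- stated objective: alternative
-- what changed: B builds the matrix column-major (one column per compound, negated for rhs) and then transposes with zip(*cols), with the zero-column case returning one empty row per element; A builds each row directly element by element.
import Mathlib
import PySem

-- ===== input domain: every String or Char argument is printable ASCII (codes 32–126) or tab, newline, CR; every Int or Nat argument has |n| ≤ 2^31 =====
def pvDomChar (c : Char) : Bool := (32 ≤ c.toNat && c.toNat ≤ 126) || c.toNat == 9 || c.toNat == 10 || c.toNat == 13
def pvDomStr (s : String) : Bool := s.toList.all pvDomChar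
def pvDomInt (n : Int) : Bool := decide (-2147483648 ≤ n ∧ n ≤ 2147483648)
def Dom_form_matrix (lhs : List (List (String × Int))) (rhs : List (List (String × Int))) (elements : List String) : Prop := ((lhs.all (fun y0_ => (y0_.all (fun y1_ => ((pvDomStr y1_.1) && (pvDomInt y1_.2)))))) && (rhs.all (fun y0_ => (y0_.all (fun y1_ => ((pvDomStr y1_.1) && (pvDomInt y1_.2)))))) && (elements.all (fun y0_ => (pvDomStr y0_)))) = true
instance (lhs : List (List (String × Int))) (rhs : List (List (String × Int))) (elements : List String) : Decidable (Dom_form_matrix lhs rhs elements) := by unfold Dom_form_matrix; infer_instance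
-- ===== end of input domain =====

-- B builds the matrix column-major (one column per compound, rhs negated) and transposes; same cost, different decomposition ("alternative").

-- ===== PORT A =====
-- row-major: for each element, scan lhs then rhs appending one entry per compound
def form_matrix (lhs : List (List (String × Int))) (rhs : List (List (String × Int))) (elements : List String) : List (List Int) :=
  elements.foldl (fun matrix element =>
    let row := lhs.foldl (fun row compound => row ++ [PySem.Dict.getD ⟨compound⟩ element 0]) []
    let row := rhs.foldl (fun row compound => row ++ [-(PySem.Dict.getD ⟨compound⟩ element 0)]) row
    matrix ++ [row]) []

-- ===== PORT B =====
-- column-major: one column per compound, then zip(*cols); zero columns ⇒ one empty row per element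
-- the column list: one column per lhs compound, then one negated column per rhs compound
def pvCols (lhs : List (List (String × Int))) (rhs : List (List (String × Int))) (elements : List String) : List (List Int) :=
  lhs.map (fun c => elements.map (fun e => PySem.Dict.getD ⟨c⟩ e 0))
    ++ rhs.map (fun c => elements.map (fun e => -(PySem.Dict.getD ⟨c⟩ e 0)))

def form_matrix_alt (lhs : List (List (String × Int))) (rhs : List (List (String × Int))) (elements : List String) : List (List Int) :=
  if (pvCols lhs rhs elements).isEmpty then elements.map (fun _ => ([] : List Int))
  else
    -- zip(*cols): min column length many rows, row i = i-th entry of each column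
    (List.range ((((pvCols lhs rhs elements).map List.length).min?).getD 0)).map
      (fun i => (pvCols lhs rhs elements).map (fun c => c.getD i 0))

-- ===== PRECONDITION & SPEC =====
def Spec_form_matrix (lhs : List (List (String × Int))) (rhs : List (List (String × Int))) (elements : List String) (out : List (List Int)) : Prop := out = form_matrix_alt lhs rhs elements
instance (lhs : List (List (String × Int))) (rhs : List (List (String × Int))) (elements : List String) (out : List (List Int)) : Decidable (Spec_form_matrix lhs rhs elements out) := by unfold Spec_form_matrix; infer_instance

-- ===== CLAIM (what is proved, stated in full; the proofs are below) =====
def Claim_equal_form_matrix : Prop := ∀ (lhs : List (List (String × Int))) (rhs : List (List (String × Int))) (elements : List String), Dom_form_matrix lhs rhs elements → Spec_form_matrix lhs rhs elements (form_matrix lhs rhs elements)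

-- ===== LEMMAS AND PROOFS =====

theorem pv_flat {α β : Type} (f : α → β) (l : List α) :
    (l.map (fun x => [f x])).flatten = l.map f := by
  induction l with
  | nil => rfl
  | cons x xs ih => simp [ih]

theorem pv_foldl_app {α β : Type} (f : α → β) (l : List α) (init : List β) :
    List.foldl (fun acc x => acc ++ [f x]) init l = init ++ l.map f := by
  induction l generalizing init with
  | nil => simp
  | cons x xs ih => simp [List.foldl, ih]

-- A, rewritten as a map over elements
theorem formA_eq_map (lhs rhs : List (List (String × Int))) (elements : List String) :
    form_matrix lhs rhs elements =
      elements.map (fun e =>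
        lhs.map (fun c => PySem.Dict.getD ⟨c⟩ e 0) ++ rhs.map (fun c => -(PySem.Dict.getD ⟨c⟩ e 0))) := by
  unfold form_matrix
  have hstep : (fun (matrix : List (List Int)) (element : String) =>
      let row := lhs.foldl (fun row compound => row ++ [PySem.Dict.getD ⟨compound⟩ element 0]) []
      let row := rhs.foldl (fun row compound => row ++ [-(PySem.Dict.getD ⟨compound⟩ element 0)]) row
      matrix ++ [row])
    = fun matrix element => matrix ++
        [lhs.map (fun c => PySem.Dict.getD ⟨c⟩ element 0) ++ rhs.map (fun c => -(PySem.Dict.getD ⟨c⟩ element 0))] := by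
    funext m e
    simp [pv_flat]
  rw [hstep, pv_foldl_app]
  simp

theorem pv_min?_const {l : List Nat} (n : Nat) (hne : l ≠ []) (h : ∀ x ∈ l, x = n) :
    l.min? = some n := by
  induction l with
  | nil => simp at hne
  | cons x xs ih =>
    rcases xs with _ | ⟨y, ys⟩
    · simp [List.min?, h x (by simp)]
    · rw [List.min?_cons]
      rw [ih (by simp) (fun z hz => h z (by simp [hz]))]
      simp [h x (by simp)]

-- zip(*cols) of equal-length nonempty columns, characterised row-wise
theorem pv_transpose {F : String → List Int} (cols : List (List Int)) (els : List String)
    (hne : cols ≠ [])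
    (hlen : ∀ c ∈ cols, c.length = els.length)
    (hcol : ∀ (i : Nat), i < els.length → cols.map (fun c => c.getD i 0) = F els[i]!) :
    (List.range (((cols.map List.length).min?).getD 0)).map
        (fun i => cols.map (fun c => c.getD i 0)) = els.map F := by
  have hmin : (cols.map List.length).min? = some els.length := by
    apply pv_min?_const
    · simpa using hne
    · intro x hx
      simp only [List.mem_map] at hx
      obtain ⟨c, hc, rfl⟩ := hx
      exact hlen c hc
  rw [hmin]
  simp only [Option.getD_some]
  apply List.ext_getElem
  · simp
  · intro i h1 h2
    have hi : i < els.length := by simpa using h2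
    simp only [List.getElem_map, List.getElem_range]
    rw [hcol i hi, getElem!_pos els i hi]

theorem form_matrix_spec' (lhs rhs : List (List (String × Int))) (elements : List String) :
    form_matrix lhs rhs elements = form_matrix_alt lhs rhs elements := by
  rw [formA_eq_map]
  unfold form_matrix_alt
  split_ifs with hIf
  · have hb : lhs = [] ∧ rhs = [] := by
      rcases lhs with _ | _ <;> rcases rhs with _ | _ <;> simp_all [pvCols]
    obtain ⟨rfl, rfl⟩ := hb
    simp
  · have hne : pvCols lhs rhs elements ≠ [] := by
      intro h; simp [h] at hIf
    refine (pv_transpose _ elements hne ?_ ?_).symm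
    · intro c hc
      simp only [pvCols, List.mem_append, List.mem_map] at hc
      rcases hc with ⟨d, _, rfl⟩ | ⟨d, _, rfl⟩ <;> simp
    · intro i hi
      rw [pvCols, List.map_append, List.map_map, List.map_map, getElem!_pos elements i hi]
      congr 1 <;>
      · apply List.map_congr_left
        intro c _
        simp only [Function.comp]
        rw [List.getD_eq_getElem _ _ (by simpa using hi), List.getElem_map]

-- ===== VERDICT (by name: the statement is the Claim_ definition above) =====
theorem form_matrix_spec : Claim_equal_form_matrix := by
  intro lhs rhs elements _
  unfold Spec_form_matrix
  exact form_matrix_spec' lhs rhs elements
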